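-- pv_equiv track=rewrite | github.com/DevRoss/python-offer-code | offer/61_ContinousCards.py | solve
-- ===== SOURCE A (Python) =====
-- def solve(numbers: list):
--     if not numbers or len(numbers) != 5:
--         return False
--     sorted_num = sorted(numbers)
--     num_0 = sorted_num.count(0)
--     index = num_0
--     while index < len(numbers) - 1:
--         dif = sorted_num[index + 1] - sorted_num[index]
--         # 有对
--         if dif == 0:
--             return False
--         elif dif == 1:
--             pass
--         elif dif - 1 > num_0:
--             return False
--         else:
--             num_0 -= dif - 1
--         index += 1
--     return True
-- ===== SOURCE B (Python) =====
-- def solve(numbers: list):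
--     if not numbers or len(numbers) != 5:
--         return False
--     z = numbers.count(0)
--     if z >= 4:
--         return True
--     rest = sorted(numbers)[z:]
--     return len(set(rest)) == len(rest) and rest[-1] - rest[0] <= 4
-- ===== Notes on version B (the rewrite author's own statement) =====
-- stated objective: simpler
-- what changed: Replaces A's greedy gap-consuming while-loop over the sorted list (mutable wildcard budget) with a closed-form check: after skipping the count-of-zeros smallest sorted elements, the hand is a straight iff those elements are pairwise distinct and their range is at most 4.
import Mathlib
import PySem

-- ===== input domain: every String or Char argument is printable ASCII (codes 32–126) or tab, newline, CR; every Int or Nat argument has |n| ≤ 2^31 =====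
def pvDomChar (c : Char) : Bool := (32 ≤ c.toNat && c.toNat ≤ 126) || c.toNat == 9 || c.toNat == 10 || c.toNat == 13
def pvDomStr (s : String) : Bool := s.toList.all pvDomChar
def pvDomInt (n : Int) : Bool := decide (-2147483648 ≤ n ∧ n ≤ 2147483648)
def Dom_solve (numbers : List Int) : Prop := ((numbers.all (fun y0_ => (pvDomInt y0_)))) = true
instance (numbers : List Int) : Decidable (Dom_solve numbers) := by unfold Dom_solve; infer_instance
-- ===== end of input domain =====

-- B replaces A's greedy wildcard-consuming while-loop with a distinct-and-range-≤-4 check (objective: simpler).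

-- ===== PORT A =====
-- the while-loop: index and num0 are the loop state; n = len(numbers)
def solveLoop (sorted_num : List Int) (n : Nat) (index : Nat) (num0 : Int) : Bool :=
  if _h : index + 1 < n then
    -- indices index and index+1 are always in range here (n = length, index+1 < n), so pyGetD is exact
    let dif := PySem.List.pyGetD sorted_num ((index : Int) + 1) 0 - PySem.List.pyGetD sorted_num (index : Int) 0
    if dif = 0 then false
    else if dif = 1 then solveLoop sorted_num n (index + 1) num0
    else if dif - 1 > num0 then false
    else solveLoop sorted_num n (index + 1) (num0 - (dif - 1))
  else true
termination_by n - index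

def solve (numbers : List Int) : Bool :=
  if numbers = [] ∨ numbers.length ≠ 5 then false
  else
    let sorted_num := PySem.List.sorted numbers (fun x => x) false
    let num_0 := PySem.List.count sorted_num 0
    solveLoop sorted_num numbers.length num_0 (num_0 : Int)

-- ===== PORT B =====
def solve_alt (numbers : List Int) : Bool :=
  if numbers = [] ∨ numbers.length ≠ 5 then false
  else
    let z := PySem.List.count numbers 0
    if z ≥ 4 then true
    else
      let rest := PySem.List.slice (PySem.List.sorted numbers (fun x => x) false) (some (z : Int)) none
      decide ((PySem.Set.ofList rest).length = rest.length) &&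
      decide (PySem.List.pyGetD rest (-1) 0 - PySem.List.pyGetD rest 0 0 ≤ 4)

-- ===== PRECONDITION & SPEC =====
def Spec_solve (numbers : List Int) (out : Bool) : Prop := out = solve_alt numbers
instance (numbers : List Int) (out : Bool) : Decidable (Spec_solve numbers out) := by unfold Spec_solve; infer_instance

-- ===== CLAIM (what is proved, stated in full; the proofs are below) =====
def Claim_equal_solve : Prop := ∀ (numbers : List Int), Dom_solve numbers → Spec_solve numbers (solve numbers)

-- ===== LEMMAS AND PROOFS =====

lemma solveLoop_step (s : List Int) (n index : Nat) (num0 : Int) (h : index + 1 < n) :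
    solveLoop s n index num0 =
      (if PySem.List.pyGetD s ((index : Int) + 1) 0 - PySem.List.pyGetD s (index : Int) 0 = 0 then false
       else if PySem.List.pyGetD s ((index : Int) + 1) 0 - PySem.List.pyGetD s (index : Int) 0 = 1 then solveLoop s n (index + 1) num0
       else if PySem.List.pyGetD s ((index : Int) + 1) 0 - PySem.List.pyGetD s (index : Int) 0 - 1 > num0 then false
       else solveLoop s n (index + 1) (num0 - (PySem.List.pyGetD s ((index : Int) + 1) 0 - PySem.List.pyGetD s (index : Int) 0 - 1))) := by
  rw [solveLoop]; simp [h]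

lemma solveLoop_stop (s : List Int) (n index : Nat) (num0 : Int) (h : n ≤ index + 1) :
    solveLoop s n index num0 = true := by
  rw [solveLoop]; simp [Nat.not_lt.mpr h]

lemma len5 (s : List Int) (h : s.length = 5) : ∃ a b c d e, s = [a, b, c, d, e] := by
  rcases s with _|⟨a, _|⟨b, _|⟨c, _|⟨d, _|⟨e, _|⟨f, t⟩⟩⟩⟩⟩⟩ <;> simp at h
  exact ⟨a, b, c, d, e, rfl⟩

-- closed forms of the A-loop from each start index, on a sorted 5-list with a nonnegative budget
lemma loop3 (a b c d e : Int) (m : Int) (h : d ≤ e) (hm : 0 ≤ m) :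
    solveLoop [a,b,c,d,e] 5 3 m = decide (d < e ∧ e - d - 1 ≤ m) := by
  rw [solveLoop_step _ _ _ _ (by norm_num)]
  have hx : PySem.List.pyGetD [a,b,c,d,e] (((3:Nat):Int)+1) 0 = e := by norm_num [PySem.List.pyGetD_ofNat']
  have hy : PySem.List.pyGetD [a,b,c,d,e] ((3:Nat):Int) 0 = d := by norm_num [PySem.List.pyGetD_ofNat']
  simp only [hx, hy]
  split_ifs with g0 g1 g2
  · exact (decide_eq_false (by omega)).symm
  · rw [solveLoop_stop _ _ _ _ (by norm_num)]
    exact (decide_eq_true (by omega)).symm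
  · exact (decide_eq_false (by omega)).symm
  · rw [solveLoop_stop _ _ _ _ (by norm_num)]
    exact (decide_eq_true (by omega)).symm

lemma loop2 (a b c d e : Int) (m : Int) (h1 : c ≤ d) (h2 : d ≤ e) (hm : 0 ≤ m) :
    solveLoop [a,b,c,d,e] 5 2 m = decide (c < d ∧ d < e ∧ e - c - 2 ≤ m) := by
  rw [solveLoop_step _ _ _ _ (by norm_num)]
  have hx : PySem.List.pyGetD [a,b,c,d,e] (((2:Nat):Int)+1) 0 = d := by norm_num [PySem.List.pyGetD_ofNat']
  have hy : PySem.List.pyGetD [a,b,c,d,e] ((2:Nat):Int) 0 = c := by norm_num [PySem.List.pyGetD_ofNat']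
  simp only [hx, hy]
  split_ifs with g0 g1 g2
  · exact (decide_eq_false (by omega)).symm
  · rw [show (2:Nat)+1 = 3 from rfl, loop3 _ _ _ _ _ _ h2 hm]
    simp only [decide_eq_decide]; omega
  · exact (decide_eq_false (by omega)).symm
  · rw [show (2:Nat)+1 = 3 from rfl, loop3 _ _ _ _ _ _ h2 (by omega)]
    simp only [decide_eq_decide]; omega

lemma loop1 (a b c d e : Int) (m : Int) (h0 : b ≤ c) (h1 : c ≤ d) (h2 : d ≤ e) (hm : 0 ≤ m) :
    solveLoop [a,b,c,d,e] 5 1 m = decide (b < c ∧ c < d ∧ d < e ∧ e - b - 3 ≤ m) := by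
  rw [solveLoop_step _ _ _ _ (by norm_num)]
  have hx : PySem.List.pyGetD [a,b,c,d,e] (((1:Nat):Int)+1) 0 = c := by norm_num [PySem.List.pyGetD_ofNat']
  have hy : PySem.List.pyGetD [a,b,c,d,e] ((1:Nat):Int) 0 = b := by norm_num [PySem.List.pyGetD_ofNat']
  simp only [hx, hy]
  split_ifs with g0 g1 g2
  · exact (decide_eq_false (by omega)).symm
  · rw [show (1:Nat)+1 = 2 from rfl, loop2 _ _ _ _ _ _ h1 h2 hm]
    simp only [decide_eq_decide]; omega
  · exact (decide_eq_false (by omega)).symm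
  · rw [show (1:Nat)+1 = 2 from rfl, loop2 _ _ _ _ _ _ h1 h2 (by omega)]
    simp only [decide_eq_decide]; omega

lemma loop0 (a b c d e : Int) (m : Int) (ha : a ≤ b) (h0 : b ≤ c) (h1 : c ≤ d) (h2 : d ≤ e) (hm : 0 ≤ m) :
    solveLoop [a,b,c,d,e] 5 0 m = decide (a < b ∧ b < c ∧ c < d ∧ d < e ∧ e - a - 4 ≤ m) := by
  rw [solveLoop_step _ _ _ _ (by norm_num)]
  have hx : PySem.List.pyGetD [a,b,c,d,e] (((0:Nat):Int)+1) 0 = b := by norm_num [PySem.List.pyGetD_ofNat']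
  have hy : PySem.List.pyGetD [a,b,c,d,e] ((0:Nat):Int) 0 = a := by norm_num [PySem.List.pyGetD_ofNat']
  simp only [hx, hy]
  split_ifs with g0 g1 g2
  · exact (decide_eq_false (by omega)).symm
  · rw [show (0:Nat)+1 = 1 from rfl, loop1 _ _ _ _ _ _ h0 h1 h2 hm]
    simp only [decide_eq_decide]; omega
  · exact (decide_eq_false (by omega)).symm
  · rw [show (0:Nat)+1 = 1 from rfl, loop1 _ _ _ _ _ _ h0 h1 h2 (by omega)]
    simp only [decide_eq_decide]; omega

-- set(rest) loses no element iff the sorted rest is strictly increasing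
lemma setlen5 (a b c d e : Int) (ha : a ≤ b) (h0 : b ≤ c) (h1 : c ≤ d) (h2 : d ≤ e) :
    ((PySem.Set.ofList [a,b,c,d,e]).length = ([a,b,c,d,e] : List Int).length) ↔ (a < b ∧ b < c ∧ c < d ∧ d < e) := by
  simp only [PySem.Set.ofList_eq_foldl, List.foldl, PySem.Set.add, PySem.Set.contains]
  split_ifs <;> simp_all <;> omega

lemma setlen4 (b c d e : Int) (h0 : b ≤ c) (h1 : c ≤ d) (h2 : d ≤ e) :
    ((PySem.Set.ofList [b,c,d,e]).length = ([b,c,d,e] : List Int).length) ↔ (b < c ∧ c < d ∧ d < e) := by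
  simp only [PySem.Set.ofList_eq_foldl, List.foldl, PySem.Set.add, PySem.Set.contains]
  split_ifs <;> simp_all <;> omega

lemma setlen3 (c d e : Int) (h1 : c ≤ d) (h2 : d ≤ e) :
    ((PySem.Set.ofList [c,d,e]).length = ([c,d,e] : List Int).length) ↔ (c < d ∧ d < e) := by
  simp only [PySem.Set.ofList_eq_foldl, List.foldl, PySem.Set.add, PySem.Set.contains]
  split_ifs <;> simp_all <;> omega

lemma setlen2 (d e : Int) (h2 : d ≤ e) :
    ((PySem.Set.ofList [d,e]).length = ([d,e] : List Int).length) ↔ (d < e) := by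
  simp only [PySem.Set.ofList_eq_foldl, List.foldl, PySem.Set.add, PySem.Set.contains]
  split_ifs <;> simp_all <;> omega

lemma solve_eq_alt (numbers : List Int) : solve numbers = solve_alt numbers := by
  unfold solve solve_alt
  by_cases hg : numbers = [] ∨ numbers.length ≠ 5
  · simp [hg]
  · simp only [if_neg hg]
    push_neg at hg
    obtain ⟨hne, hlen⟩ := hg
    have hperm := PySem.List.sorted_perm numbers (fun x => x) false
    have hcount : PySem.List.count numbers 0 = PySem.List.count (PySem.List.sorted numbers (fun x => x) false) 0 := by
      simp [PySem.List.count_eq]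
      exact (hperm.count_eq 0).symm
    have hpair := PySem.List.sorted_pairwise numbers (fun x => x)
    have hslen : (PySem.List.sorted numbers (fun x => x) false).length = 5 := by
      rw [PySem.List.length_sorted]; exact hlen
    rw [hcount, hlen]
    set s := PySem.List.sorted numbers (fun x => x) false with hs
    clear_value s
    obtain ⟨a, b, c, d, e, rfl⟩ := len5 s hslen
    simp only [List.pairwise_cons, List.mem_cons] at hpair
    obtain ⟨p1, p2, p3, p4, -⟩ := hpair
    have hab : a ≤ b := p1 b (Or.inl rfl)
    have hbc : b ≤ c := p2 c (Or.inl rfl)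
    have hcd : c ≤ d := p3 d (Or.inl rfl)
    have hde : d ≤ e := p4 e (Or.inl rfl)
    have hz : PySem.List.count [a,b,c,d,e] (0:Int) ≤ 5 := by
      simp only [PySem.List.count_eq]
      exact le_trans (List.count_le_length) (by simp)
    set z := PySem.List.count [a,b,c,d,e] (0:Int) with hzdef
    clear_value z
    interval_cases z
    · rw [loop0 _ _ _ _ _ _ hab hbc hcd hde (by norm_num)]
      rw [show PySem.List.slice [a,b,c,d,e] (some ((0:Nat):Int)) none = [a,b,c,d,e] from
        PySem.List.slice_from_natCast ..]
      have hx : PySem.List.pyGetD [a,b,c,d,e] (-1) 0 = e := by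
        norm_num [PySem.List.pyGetD, PySem.List.pyGet?, PySem.List.pyIdx?]
      have hy : PySem.List.pyGetD [a,b,c,d,e] 0 0 = a := by
        norm_num [PySem.List.pyGetD, PySem.List.pyGet?, PySem.List.pyIdx?]
      rw [if_neg (by norm_num), hx, hy, Bool.eq_iff_iff]
      simp only [Bool.and_eq_true, decide_eq_true_eq, setlen5 _ _ _ _ _ hab hbc hcd hde]
      omega
    · rw [loop1 _ _ _ _ _ _ hbc hcd hde (by norm_num)]
      rw [show PySem.List.slice [a,b,c,d,e] (some ((1:Nat):Int)) none = [b,c,d,e] from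
        PySem.List.slice_from_natCast ..]
      have hx : PySem.List.pyGetD [b,c,d,e] (-1) 0 = e := by
        norm_num [PySem.List.pyGetD, PySem.List.pyGet?, PySem.List.pyIdx?]
      have hy : PySem.List.pyGetD [b,c,d,e] 0 0 = b := by
        norm_num [PySem.List.pyGetD, PySem.List.pyGet?, PySem.List.pyIdx?]
      rw [if_neg (by norm_num), hx, hy, Bool.eq_iff_iff]
      simp only [Bool.and_eq_true, decide_eq_true_eq, setlen4 _ _ _ _ hbc hcd hde]
      omega
    · rw [loop2 _ _ _ _ _ _ hcd hde (by norm_num)]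
      rw [show PySem.List.slice [a,b,c,d,e] (some ((2:Nat):Int)) none = [c,d,e] from
        PySem.List.slice_from_natCast ..]
      have hx : PySem.List.pyGetD [c,d,e] (-1) 0 = e := by
        norm_num [PySem.List.pyGetD, PySem.List.pyGet?, PySem.List.pyIdx?]
      have hy : PySem.List.pyGetD [c,d,e] 0 0 = c := by
        norm_num [PySem.List.pyGetD, PySem.List.pyGet?, PySem.List.pyIdx?]
      rw [if_neg (by norm_num), hx, hy, Bool.eq_iff_iff]
      simp only [Bool.and_eq_true, decide_eq_true_eq, setlen3 _ _ _ hcd hde]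
      omega
    · rw [loop3 _ _ _ _ _ _ hde (by norm_num)]
      rw [show PySem.List.slice [a,b,c,d,e] (some ((3:Nat):Int)) none = [d,e] from
        PySem.List.slice_from_natCast ..]
      have hx : PySem.List.pyGetD [d,e] (-1) 0 = e := by
        norm_num [PySem.List.pyGetD, PySem.List.pyGet?, PySem.List.pyIdx?]
      have hy : PySem.List.pyGetD [d,e] 0 0 = d := by
        norm_num [PySem.List.pyGetD, PySem.List.pyGet?, PySem.List.pyIdx?]
      rw [if_neg (by norm_num), hx, hy, Bool.eq_iff_iff]
      simp only [Bool.and_eq_true, decide_eq_true_eq, setlen2 _ _ hde]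
      omega
    · rw [solveLoop_stop _ _ _ _ (by norm_num), if_pos (by norm_num)]
    · rw [solveLoop_stop _ _ _ _ (by norm_num), if_pos (by norm_num)]

-- ===== VERDICT (by name: the statement is the Claim_ definition above) =====
theorem solve_spec : Claim_equal_solve := by
  intro numbers _
  unfold Spec_solve
  exact solve_eq_alt numbers
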